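-- pv_equiv track=rewrite | github.com/y0dev/article_to_json | pug_creater/lib/post_gen.py | __remove_except_key
-- ===== SOURCE A (Python) =====
-- def __remove_except_key(string:str, key:str):
--      # Split the input string into a list of individual substrings
--     substrings = string.split(key)
--
--     # Initialize an empty string to store the output
--     output_string = ''
--
--     # Iterate over each substring in the list
--     for i, substring in enumerate(substrings):
--         # If the substring contains "key=", add it to the output string
--         if key in substring:
--             output_string += substring
--
--         # If the substring does not contain "key=" and this is not the last substring in the list, add "key=" to the output string
--         elif i < len(substrings) - 1:
--             output_string += key
--
--         # Return the resulting output string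
--     return output_string
-- ===== SOURCE B (Python) =====
-- def __remove_except_key(string: str, key: str):
--     # Each gap between split pieces is one occurrence of key; pieces never
--     # contain the separator, so A's first branch is dead and the output is
--     # just key repeated once per gap.  Splitting (not count()) keeps the
--     # ValueError on an empty key.
--     return key * (len(string.split(key)) - 1)
-- ===== Notes on version B (the rewrite author's own statement) =====
-- stated objective: simpler
-- what changed: B replaces the enumerate loop (with its dead 'key in substring' branch, impossible on split pieces) by the closed form key * (len(string.split(key)) - 1): one copy of key per gap between split pieces; it still splits, so the empty-key ValueError is preserved.
import Mathlib
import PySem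

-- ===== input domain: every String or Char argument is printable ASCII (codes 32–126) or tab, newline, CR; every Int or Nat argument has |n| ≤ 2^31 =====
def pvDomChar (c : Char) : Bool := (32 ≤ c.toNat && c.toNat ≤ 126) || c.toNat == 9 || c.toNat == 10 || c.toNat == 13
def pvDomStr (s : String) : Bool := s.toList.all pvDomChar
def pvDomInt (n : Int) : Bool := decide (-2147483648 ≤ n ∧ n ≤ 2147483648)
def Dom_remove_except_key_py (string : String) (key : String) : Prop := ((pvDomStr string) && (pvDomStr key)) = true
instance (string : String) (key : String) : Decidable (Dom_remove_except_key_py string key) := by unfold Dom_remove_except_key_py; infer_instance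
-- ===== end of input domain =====

-- B replaces A's enumerate loop by the closed form key * (len(string.split(key)) - 1); same behaviour, same exception on empty key.


-- ===== PORT A =====
def remove_except_key_py (string : String) (key : String) : String :=
  match PySem.Chars.split? string.toList key.toList with
  | none => ""   -- Python raises ValueError (empty separator); excluded by Pre_
  | some substrings =>
    String.ofList ((PySem.List.enumerate substrings).foldl
      (fun output_string iSub =>
        if PySem.Chars.isIn key.toList iSub.2 then output_string ++ iSub.2
        else if iSub.1 < (substrings.length : Int) - 1 then output_string ++ key.toList
        else output_string) [])

-- ===== PORT B =====
-- key * n  (n ≥ 0 here, since split always returns at least one piece) is key's chars flattened n times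
def remove_except_key_py_alt (string : String) (key : String) : String :=
  match PySem.Chars.split? string.toList key.toList with
  | none => ""   -- Python raises ValueError (empty separator); excluded by Pre_
  | some pieces =>
    String.ofList (List.flatten (List.replicate (pieces.length - 1) key.toList))

-- ===== PRECONDITION & SPEC =====
-- Pre_ excludes exactly key = "", where Python's str.split raises ValueError in both A and B.
def Pre_remove_except_key_py (string : String) (key : String) : Prop := key ≠ ""
instance (string : String) (key : String) : Decidable (Pre_remove_except_key_py string key) := by unfold Pre_remove_except_key_py; infer_instance
def pvWitness_remove_except_key_py : String × String := ("a=1 b=2", "=")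

def Spec_remove_except_key_py (string : String) (key : String) (out : String) : Prop := out = remove_except_key_py_alt string key
instance (string : String) (key : String) (out : String) : Decidable (Spec_remove_except_key_py string key out) := by unfold Spec_remove_except_key_py; infer_instance

-- ===== CLAIM (what is proved, stated in full; the proofs are below) =====
def Claim_equal_remove_except_key_py : Prop := ∀ (string : String) (key : String), Dom_remove_except_key_py string key → Pre_remove_except_key_py string key → Spec_remove_except_key_py string key (remove_except_key_py string key)

-- ===== LEMMAS AND PROOFS =====

-- Invariant of splitOn.go's current-chunk accumulator: no nonempty prefix of cur,
-- reversed and put back in front of the unscanned rest l, starts with sep.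
def CurInv (sep cur l : List Char) : Prop :=
  ∀ p, p <+: cur → p ≠ [] → ¬ sep <+: (p.reverse ++ l)

theorem curInv_nil (sep l : List Char) : CurInv sep [] l := by
  intro p hp hne
  simp [List.prefix_nil] at hp
  exact absurd hp hne

-- A chunk closed under CurInv (with nothing left to scan) cannot contain sep.
theorem curInv_emit (sep cur l : List Char) (hsep : sep ≠ []) (hinv : CurInv sep cur l) :
    ¬ sep <:+: cur.reverse := by
  rintro ⟨a, c, hac⟩
  have hsuf : (sep ++ c) <:+ cur.reverse := ⟨a, by simpa using hac⟩
  have hpre : (sep ++ c).reverse <+: cur :=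
    (List.reverse_suffix (l₁ := (sep ++ c).reverse) (l₂ := cur)).mp (by simpa using hsuf)
  have := hinv _ hpre (by simp [hsep]) 
  exact this ⟨c ++ l, by simp⟩

theorem go_noInfix (sep : List Char) (hsep : sep ≠ []) :
    ∀ (fuel : Nat) (l cur : List Char) (acc : List (List Char)),
      l.length ≤ fuel → CurInv sep cur l → (∀ p ∈ acc, ¬ sep <:+: p) →
      ∀ p ∈ PySem.Chars.splitOn.go sep fuel l cur acc, ¬ sep <:+: p := by
  intro fuel
  induction fuel with
  | zero =>
    intro l cur acc hf hinv hacc p hp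
    have hl : l = [] := by cases l <;> simp_all
    subst hl
    simp [PySem.Chars.splitOn.go] at hp
    rcases hp with h | h
    · exact hacc _ h
    · subst h; exact curInv_emit sep cur [] hsep hinv
  | succ fuel ih =>
    intro l cur acc hf hinv hacc p hp
    cases l with
    | nil =>
      simp [PySem.Chars.splitOn.go] at hp
      rcases hp with h | h
      · exact hacc _ h
      · subst h; exact curInv_emit sep cur [] hsep hinv
    | cons c rest =>
      rw [PySem.Chars.splitOn.go] at hp
      by_cases hpre : sep.isPrefixOf (c :: rest) = true
      · simp only [hpre, if_true] at hp
        refine ih _ [] _ ?_ (curInv_nil _ _) ?_ p hp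
        · have : sep.length ≥ 1 := by cases sep <;> simp_all
          simp at hf ⊢; omega
        · intro q hq
          rcases List.mem_cons.mp hq with h | h
          · subst h; exact curInv_emit sep cur (c :: rest) hsep hinv
          · exact hacc _ h
      · simp only [hpre] at hp
        refine ih _ (c :: cur) _ ?_ ?_ hacc p hp
        · simp at hf ⊢; omega
        · intro q hq hne
          rcases (List.prefix_cons_iff.mp hq) with h | ⟨q', hq', h⟩
          · exact absurd h hne
          · by_cases hq'' : q' = []
            · subst hq''; subst hq'
              intro hcon
              exact hpre (by simpa [List.isPrefixOf_iff_prefix] using hcon)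
            · subst hq'
              have := hinv q' h hq''
              simpa using this

theorem splitOn_noInfix (s sep : List Char) (hsep : sep ≠ []) :
    ∀ p ∈ PySem.Chars.splitOn s sep, ¬ sep <:+: p := by
  intro p hp
  exact go_noInfix sep hsep (s.length + 1) s [] [] (by omega) (curInv_nil _ _) (by simp) p
    (by simpa [PySem.Chars.splitOn] using hp)

-- A's loop over the enumerated pieces, once the first branch is dead,
-- appends sep for every piece except the last.
theorem fold_eq_replicate (sep : List Char) (n : Nat) :
    ∀ (ps : List (List Char)) (j : Int) (out : List Char),
      (∀ p ∈ ps, PySem.Chars.isIn sep p = false) → j + ps.length = n →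
      (PySem.List.enumerate ps j).foldl
        (fun output_string iSub =>
          if PySem.Chars.isIn sep iSub.2 then output_string ++ iSub.2
          else if iSub.1 < (n : Int) - 1 then output_string ++ sep
          else output_string) out
      = out ++ List.flatten (List.replicate (ps.length - 1) sep) := by
  intro ps
  induction ps with
  | nil => intro j out _ _; simp [PySem.List.enumerate]
  | cons p ps ih =>
    intro j out hIn hj
    simp only [PySem.List.enumerate, List.foldl_cons]
    rw [hIn p (by simp)]
    simp only [Bool.false_eq_true, if_false]
    cases ps with
    | nil =>
      have : ¬ (j < (n : Int) - 1) := by simp at hj; omega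
      simp [this, PySem.List.enumerate]
    | cons q qs =>
      have hlt : j < (n : Int) - 1 := by simp only [List.length_cons] at hj; push_cast at hj; omega
      rw [if_pos hlt]
      rw [ih (j + 1) (out ++ sep) (fun r hr => hIn r (by simp [hr]))
        (by simp only [List.length_cons] at hj ⊢; push_cast at hj ⊢; omega)]
      simp [List.replicate_succ]

-- ===== VERDICT (by name: the statement is the Claim_ definition above) =====
theorem remove_except_key_py_spec : Claim_equal_remove_except_key_py := by
  intro string key _ hpre
  unfold Spec_remove_except_key_py remove_except_key_py remove_except_key_py_alt
  have hkey : key.toList ≠ [] := by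
    intro h; exact hpre (String.toList_eq_nil_iff.mp h)
  have hsplit : PySem.Chars.split? string.toList key.toList
      = some (PySem.Chars.splitOn string.toList key.toList) := by
    simp [PySem.Chars.split?, List.isEmpty_iff, hkey]
  rw [hsplit]
  dsimp only
  set ps := PySem.Chars.splitOn string.toList key.toList with hps
  have hIn : ∀ p ∈ ps, PySem.Chars.isIn key.toList p = false := by
    intro p hp
    exact (PySem.Chars.isIn_eq_false_iff _ _).mpr (splitOn_noInfix _ _ hkey p hp)
  have := fold_eq_replicate key.toList ps.length ps 0 [] hIn (by simp)
  rw [this]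
  simp
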